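-- pv_equiv track=rewrite | github.com/OxQuasar/nous-memories | iching/eastwest/cyclotomic_probe.py | get_complement_pairs
-- ===== SOURCE A (Python) =====
-- def complement(x, n):
--     return x ^ ((1 << n) - 1)
--
-- def get_complement_pairs(n):
--     """Return sorted list of (rep, comp) pairs. Rep = min of pair."""
--     pairs, seen = [], set()
--     for x in range(1 << n):
--         if x not in seen:
--             cx = complement(x, n)
--             seen.add(x); seen.add(cx)
--             pairs.append((min(x, cx), max(x, cx)))
--     return sorted(pairs)
-- ===== SOURCE B (Python) =====
-- def get_complement_pairs(n):
--     """Return sorted list of (rep, comp) pairs. Rep = min of pair."""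
--     if n == 0:
--         return [(0, 0)]
--     top = (1 << n) - 1
--     return [(x, top - x) for x in range(1 << (n - 1))]
-- ===== Notes on version B (the rewrite author's own statement) =====
-- stated objective: faster
-- what changed: B directly emits the already-sorted complement pairs for the lower half of the range instead of scanning the whole range with a seen-set, per-pair min/max and a final sort.
import Mathlib
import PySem

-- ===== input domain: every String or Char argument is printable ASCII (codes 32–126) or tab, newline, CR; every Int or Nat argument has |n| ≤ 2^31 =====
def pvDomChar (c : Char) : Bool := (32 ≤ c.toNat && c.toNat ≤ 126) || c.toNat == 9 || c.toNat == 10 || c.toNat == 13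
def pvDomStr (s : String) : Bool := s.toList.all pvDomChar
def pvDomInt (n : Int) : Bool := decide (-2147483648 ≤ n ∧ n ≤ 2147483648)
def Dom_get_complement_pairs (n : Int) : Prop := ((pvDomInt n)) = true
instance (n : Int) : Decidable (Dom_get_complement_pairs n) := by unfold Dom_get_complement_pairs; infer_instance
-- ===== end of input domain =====

-- B replaces A's full-range scan with a seen-set and a final sort by directly emitting the
-- already-sorted complement pairs for the lower half of the range; objective: faster.

-- ===== PORT A =====
-- x ^ ((1 << n) - 1); '<<' with a Nat shift (Pre_ gives 0 ≤ n, where Python would not raise)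
def pyComplement (x n : Int) : Int := PySem.Int.bxor x (((1:Int) <<< n.toNat) - 1)

-- the body of A's 'for x in range(1 << n)' loop, on state (pairs, seen)
def pvStepA (n : Int) (st : List (Int × Int) × PySem.Set Int) (x : Int) :
    List (Int × Int) × PySem.Set Int :=
  if PySem.Set.contains st.2 x then st
  else
    let cx := pyComplement x n
    (st.1 ++ [(min x cx, max x cx)], PySem.Set.add (PySem.Set.add st.2 x) cx)

def get_complement_pairs (n : Int) : List (Int × Int) :=
  let res := (PySem.List.pyRange 0 ((1:Int) <<< n.toNat)).foldl (pvStepA n) ([], PySem.Set.empty)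
  PySem.List.sorted2 res.1 (fun p => p.1) (fun p => p.2)

-- ===== PORT B =====
def get_complement_pairs_alt (n : Int) : List (Int × Int) :=
  if n = 0 then [(0, 0)]
  else
    let top : Int := ((1:Int) <<< n.toNat) - 1
    (PySem.List.pyRange 0 ((1:Int) <<< (n - 1).toNat)).map (fun x => (x, top - x))

-- ===== PRECONDITION & SPEC =====
-- Python's '1 << n' raises ValueError for n < 0 (in both A and B); nothing else is excluded.
def Pre_get_complement_pairs (n : Int) : Prop := 0 ≤ n
instance (n : Int) : Decidable (Pre_get_complement_pairs n) := by unfold Pre_get_complement_pairs; infer_instance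
def pvWitness_get_complement_pairs : Int := (3)

def Spec_get_complement_pairs (n : Int) (out : List (Int × Int)) : Prop := out = get_complement_pairs_alt n
instance (n : Int) (out : List (Int × Int)) : Decidable (Spec_get_complement_pairs n out) := by unfold Spec_get_complement_pairs; infer_instance

-- ===== CLAIM (what is proved, stated in full; the proofs are below) =====
def Claim_equal_get_complement_pairs : Prop := ∀ (n : Int), Dom_get_complement_pairs n → Pre_get_complement_pairs n → Spec_get_complement_pairs n (get_complement_pairs n)

-- ===== LEMMAS AND PROOFS =====

-- x ^ (2^N - 1) = (2^N - 1) - x on Nat, for x < 2^N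
theorem pvXorMask (N : ℕ) : ∀ a : ℕ, a < 2^N → a ^^^ (2^N - 1) = 2^N - 1 - a := by
  induction N with
  | zero => intro a ha; interval_cases a; decide
  | succ N ih =>
    intro a ha
    have h2 : a / 2 < 2^N := by omega
    have ih2 := ih (a/2) h2
    have h2N : 2^(N+1) = 2 * 2^N := by ring
    have hlast : a % 2 ^^^ 1 = 1 - a % 2 := by
      rcases Nat.mod_two_eq_zero_or_one a with h | h <;> simp [h]
    have hx : a ^^^ (2^(N+1) - 1) = 2*((a/2) ^^^ (2^N - 1)) + (a % 2 ^^^ 1) := by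
      apply Nat.eq_of_testBit_eq
      intro i
      have hdiv : (2 * (a / 2 ^^^ 2 ^ N - 1) + (a % 2 ^^^ 1)) / 2 = (a / 2 ^^^ (2 ^ N - 1)) := by
        omega
      cases i with
      | zero =>
        simp only [Nat.testBit_zero, Nat.mul_add_mod]
        have hp : (2^(N+1) - 1) % 2 = 1 := by omega
        rcases Nat.mod_two_eq_zero_or_one a with h | h <;>
          simp [Nat.xor_mod_two_eq, Nat.add_mod, h, hp]
      | succ i =>
        have hd : (2^(N+1) - 1) / 2 = 2^N - 1 := by omega
        rw [Nat.testBit_xor, Nat.testBit_succ, Nat.testBit_succ, Nat.testBit_succ, hdiv, hd,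
          Nat.testBit_xor]
    rw [hx, ih2, hlast]
    omega

theorem pvShiftOne (N : ℕ) : (1:Int) <<< N = ((2^N : Nat) : Int) := by
  simp [Int.shiftLeft_eq]

-- the complement of k on n bits, evaluated (n.toNat = N, k < 2^N)
theorem pvComplementEval (n : Int) (N k : ℕ) (hn : n.toNat = N) (hk : k < 2^N) :
    pyComplement (k : Int) n = ((2^N : Nat) : Int) - 1 - (k : Int) := by
  have h1 : (1:Int) ≤ ((2^N : Nat) : Int) := by exact_mod_cast Nat.one_le_two_pow
  have hmask : (((1:Int) <<< n.toNat) - 1) = (((2^N - 1 : Nat)) : Int) := by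
    rw [hn, pvShiftOne]
    push_cast [Nat.one_le_two_pow]
    ring
  unfold pyComplement
  rw [hmask, PySem.Int.bxor_natCast, pvXorMask N k hk]
  omega

def pvCasts (k : ℕ) : List Int := (List.range k).map (fun j : ℕ => (j : Int))

def pvPairs (N k : ℕ) : List (Int × Int) :=
  (List.range k).map (fun j : ℕ => ((j : Int), ((2^N : Nat) : Int) - 1 - (j : Int)))

theorem pvCasts_succ (k : ℕ) : pvCasts (k+1) = pvCasts k ++ [(k : Int)] := by
  unfold pvCasts; rw [List.range_succ, List.map_append]; rfl

theorem pvPairs_succ (N k : ℕ) :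
    pvPairs N (k+1) = pvPairs N k ++ [((k : Int), ((2^N : Nat) : Int) - 1 - (k : Int))] := by
  unfold pvPairs; rw [List.range_succ, List.map_append]; rfl

-- Phase 1: after processing x = 0 .. k-1 (k ≤ 2^(N-1), 1 ≤ N), the pairs are
-- (x, 2^N-1-x) in order and the seen set holds exactly [0,k) ∪ (2^N-1-k, 2^N-1].
theorem pvLoop1 (n : Int) (N : ℕ) (hn : n.toNat = N) (hN : 1 ≤ N) :
    ∀ k : ℕ, k ≤ 2^(N-1) →
    ∃ s : PySem.Set Int,
      (pvCasts k).foldl (pvStepA n) ([], PySem.Set.empty) = (pvPairs N k, s)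
      ∧ ∀ y : Int, y ∈ s ↔ (0 ≤ y ∧ y < (k : Int)) ∨
          (((2^N : Nat) : Int) - 1 - (k : Int) < y ∧ y ≤ ((2^N : Nat) : Int) - 1) := by
  intro k
  induction k with
  | zero =>
    intro _
    refine ⟨PySem.Set.empty, by simp [pvCasts, pvPairs], ?_⟩
    intro y
    simp [PySem.Set.empty]
  | succ k ih =>
    intro hk
    obtain ⟨s, hfold, hmem⟩ := ih (by omega)
    have hpow : 2^N = 2 * 2^(N-1) := by
      have h := Nat.sub_add_cancel hN
      calc 2^N = 2^(N-1+1) := by rw [h]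
        _ = 2 * 2^(N-1) := by ring
    have hkN : k < 2^N := by omega
    have hcastle : ((2^(N-1) : ℕ) : Int) ≤ ((2^N : Nat) : Int) := by exact_mod_cast Nat.pow_le_pow_right (by norm_num) (by omega)
    have hkI : ((k : ℕ) : Int) < ((2^(N-1) : ℕ) : Int) := by exact_mod_cast (by omega : k < 2^(N-1))
    have hpowI : ((2^N : ℕ) : Int) = 2 * ((2^(N-1) : ℕ) : Int) := by exact_mod_cast hpow
    -- x = k is not yet seen
    have hnotseen : ¬ ((k : Int) ∈ s) := by
      rw [hmem]
      omega
    have hcontains : PySem.Set.contains s (k : Int) = false := by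
      rw [← Bool.not_eq_true]
      simpa [PySem.Set.contains, List.contains_iff_mem] using hnotseen
    have hcomp : pyComplement (k : Int) n = ((2^N : Nat) : Int) - 1 - (k : Int) :=
      pvComplementEval n N k hn hkN
    have hlt : (k : Int) < ((2^N : Nat) : Int) - 1 - (k : Int) := by omega
    refine ⟨(s.add (k : Int)).add (((2^N : Nat) : Int) - 1 - (k : Int)), ?_, ?_⟩
    · rw [pvCasts_succ, List.foldl_append, hfold]
      simp only [List.foldl_cons, List.foldl_nil]
      unfold pvStepA
      rw [hcontains]
      simp only [Bool.false_eq_true, if_false]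
      rw [hcomp]
      rw [min_eq_left (le_of_lt hlt), max_eq_right (le_of_lt hlt)]
      rw [pvPairs_succ]
    · intro y
      rw [PySem.Set.mem_add, PySem.Set.mem_add, hmem]
      push_cast
      omega

-- if every element of the chunk is already seen, the fold leaves the state unchanged
theorem pvLoop2 (n : Int) (p : List (Int × Int)) (s : PySem.Set Int) :
    ∀ xs : List Int, (∀ x ∈ xs, x ∈ s) → xs.foldl (pvStepA n) (p, s) = (p, s) := by
  intro xs
  induction xs with
  | nil => intro _; rfl
  | cons x xs ih =>
    intro h
    have hx : PySem.Set.contains s x = true := by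
      simpa [PySem.Set.contains, List.contains_iff_mem] using h x (List.mem_cons_self)
    simp only [List.foldl_cons]
    have : pvStepA n (p, s) x = (p, s) := by unfold pvStepA; rw [hx]; simp
    rw [this]
    exact ih (fun y hy => h y (List.mem_cons_of_mem _ hy))

-- sorted2 is the identity on a list whose first components strictly increase
theorem pvInsertFold (before : (Int × Int) → (Int × Int) → Bool) :
    ∀ (xs acc : List (Int × Int)),
      (∀ x ∈ xs, ∀ y ∈ acc, before x y = false) →
      xs.Pairwise (fun a b => before b a = false) →
      xs.foldl (fun acc x => PySem.List.insertBy before x acc) acc = acc ++ xs := by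
  intro xs
  induction xs with
  | nil => intro acc _ _; simp
  | cons x xs ih =>
    intro acc hacc hpw
    rw [List.pairwise_cons] at hpw
    simp only [List.foldl_cons]
    rw [PySem.List.insertBy_of_forall_not_before before x acc
      (fun y hy => hacc x List.mem_cons_self y hy)]
    rw [ih (acc ++ [x]) ?_ hpw.2]
    · simp
    · intro z hz y hy
      rcases List.mem_append.1 hy with hy | hy
      · exact hacc z (List.mem_cons_of_mem _ hz) y hy
      · rcases List.mem_singleton.1 hy with rfl
        exact hpw.1 z hz

theorem pvSorted2Id (xs : List (Int × Int)) (h : xs.Pairwise (fun a b => a.1 < b.1)) :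
    PySem.List.sorted2 xs (fun p => p.1) (fun p => p.2) = xs := by
  unfold PySem.List.sorted2
  simp only [if_neg (by decide : ¬ (false = true))]
  rw [pvInsertFold _ xs [] (by intro x _ y hy; simp at hy) ?_]
  · simp
  · refine h.imp ?_
    intro a b hab
    simp only [Bool.or_eq_false_iff, Bool.and_eq_false_iff, decide_eq_false_iff_not]
    constructor
    · omega
    · left; simpa using hab

theorem pvMain (n : Int) (hn : 1 ≤ n) :
    get_complement_pairs n = get_complement_pairs_alt n := by
  set N := n.toNat with hN
  have hN1 : 1 ≤ N := by omega
  have hpow : 2^N = 2^(N-1) + 2^(N-1) := by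
    have h := Nat.sub_add_cancel hN1
    calc 2^N = 2^(N-1+1) := by rw [h]
      _ = 2^(N-1) + 2^(N-1) := by ring
  obtain ⟨s, hfold, hmem⟩ := pvLoop1 n N rfl hN1 (2^(N-1)) (le_refl _)
  -- A's side
  have hA : get_complement_pairs n
      = PySem.List.sorted2 (pvPairs N (2^(N-1))) (fun p => p.1) (fun p => p.2) := by
    unfold get_complement_pairs
    rw [pvShiftOne, PySem.List.pyRange_zero_natCast]
    have hr : List.map (fun k : ℕ => (k : Int)) (List.range (2^N))
        = pvCasts (2^(N-1)) ++ (List.range (2^(N-1))).map (fun x : ℕ => ((2^(N-1) + x : ℕ) : Int)) := by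
      rw [hpow, List.range_add, List.map_append, List.map_map]; rfl
    rw [hr, List.foldl_append, hfold]
    rw [pvLoop2 n _ s _ ?_]
    intro x hx
    simp only [List.mem_map, List.mem_range] at hx
    obtain ⟨j, hj, rfl⟩ := hx
    rw [hmem]
    omega
  rw [hA, pvSorted2Id _ ?_]

  · -- B's side
    unfold get_complement_pairs_alt
    rw [if_neg (by omega)]
    have h1 : (n - 1).toNat = N - 1 := by omega
    rw [h1, pvShiftOne, pvShiftOne, PySem.List.pyRange_zero_natCast, List.map_map]
    unfold pvPairs
    rfl
  · unfold pvPairs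
    rw [List.pairwise_map]
    refine List.pairwise_lt_range.imp ?_
    intro a b hab
    simpa using hab

-- ===== VERDICT (by name: the statement is the Claim_ definition above) =====
theorem get_complement_pairs_spec : Claim_equal_get_complement_pairs := by
  intro n _ hpre
  unfold Spec_get_complement_pairs
  rcases eq_or_lt_of_le hpre with h | h
  · subst n; decide
  · exact pvMain n (by omega)
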